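-- pv_equiv track=rewrite | github.com/born-to-be-algorithm-master/solve-hyeokju | python/programmers/pccp_prob2.py | solution
-- ===== SOURCE A (Python) =====
-- def solution(land):
--     n = len(land) # n x m 행렬
--     m = len(land[0])
--     visited = [[False for _ in range(m)] for _ in range(n)]  # 방문 여부를 저장하는 2차원 리스트
--     result = [0 for _ in range(m)]  # 각 열에서 얻을 수 있는 석유량을 저장
--     answer = 0
--
--     for i in range(n):
--         for j in range(m):
--             # 석유가 있고 아직 방문하지 않았으면 BFS 탐색
--             if not visited[i][j] and land[i][j] == 1:
--                 bfs(i, j, visited, n, m, land, result)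
--
--     answer = max(result)
--
--     return answer
--
-- def bfs(x, y, visited, n, m, land, result):
--     queue = [(x, y)]
--     visited[x][y] = True  # 방문 표시
--     amount = 0  # 석유가 있는 영역의 크기
--     startY, endY = float('inf'), float('-inf')  # 석유가 있는 곳의 열의 범위
--
--     # 큐가 빌 때까지 BFS를 수행
--     while queue:
--         cx, cy = queue.pop(0)  # 큐에서 data 하나 pop
--         amount += 1  # 석유가 있는 영역의 크기를 증가
--         startY, endY = min(startY, cy), max(endY, cy)  # 석유가 있는 곳의 열의 범위 update
--
--         # 상하좌우 탐색
--         for dx, dy in [(-1, 0), (1, 0), (0, -1), (0, 1)]: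
--             nx = cx + dx
--             ny = cy + dy
--
--             # 석유가 있고 아직 방문하지 않았다면 큐에 추가
--             if 0 <= nx < n and 0 <= ny < m and not visited[nx][ny] and land[nx][ny] == 1:
--                 queue.append((nx, ny))
--                 visited[nx][ny] = True
--
--     # 얻을 수 있는 석유량을 result에 저장
--     for col in range(startY, endY + 1):
--         result[col] += amount
-- ===== SOURCE B (Python) =====
-- def solution(land):
--     n = len(land)
--     m = len(land[0])
--     seen = [[False] * m for _ in range(n)]
--     comps = []
--     for i in range(n):
--         for j in range(m):
--             if land[i][j] == 1 and not seen[i][j]: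
--                 # iterative DFS with an explicit stack; collect the component's cells
--                 seen[i][j] = True
--                 stack = [(i, j)]
--                 cells = []
--                 while stack:
--                     x, y = stack.pop()
--                     cells.append((x, y))
--                     for nx, ny in ((x - 1, y), (x + 1, y), (x, y - 1), (x, y + 1)):
--                         if 0 <= nx < n and 0 <= ny < m and land[nx][ny] == 1 and not seen[nx][ny]:
--                             seen[nx][ny] = True
--                             stack.append((nx, ny))
--                 comps.append(cells)
--     spans = [(min(y for _, y in comp), max(y for _, y in comp), len(comp)) for comp in comps]
--     return max(sum(s for lo, hi, s in spans if lo <= c <= hi) for c in range(m))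
-- ===== Notes on version B (the rewrite author's own statement) =====
-- stated objective: alternative
-- what changed: Replaces the BFS with a pop(0) queue that accumulates amount/min-col/max-col into a result array during traversal by an explicit-stack DFS that only collects each component's cell list; column spans and sizes are aggregated afterwards and the answer is a max over per-column sums, with no result array mutated during traversal.
import Mathlib
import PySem

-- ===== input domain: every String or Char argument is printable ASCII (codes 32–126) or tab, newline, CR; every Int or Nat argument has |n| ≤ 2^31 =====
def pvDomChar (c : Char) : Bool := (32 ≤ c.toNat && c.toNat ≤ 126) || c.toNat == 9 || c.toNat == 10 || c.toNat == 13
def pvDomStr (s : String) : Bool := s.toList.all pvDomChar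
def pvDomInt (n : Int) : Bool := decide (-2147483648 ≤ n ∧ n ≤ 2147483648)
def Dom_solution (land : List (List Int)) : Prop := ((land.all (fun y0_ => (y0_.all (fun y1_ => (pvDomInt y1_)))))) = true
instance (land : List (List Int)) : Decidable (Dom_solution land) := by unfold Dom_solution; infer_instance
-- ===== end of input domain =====

-- B replaces A's pop(0)-queue BFS that accumulates amount/min-col/max-col into a result array during
-- traversal by an explicit-stack DFS that only collects each component's cells; spans are aggregated
-- afterwards and the answer is a max over per-column sums (alternative decomposition, same cost).

-- ===== PORT A =====
-- shared low-level grid accessors (used by both ports; each is exact under the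
-- in-range guards the code performs and the row-length condition in Pre_solution)
def pvLandAt (land : List (List Int)) (x y : Int) : Int :=
  (PySem.List.pyGet? ((PySem.List.pyGet? land x).getD []) y).getD 0
def pvVget (v : List (List Bool)) (x y : Int) : Bool :=
  (PySem.List.pyGet? ((PySem.List.pyGet? v x).getD []) y).getD false
def pvVset (v : List (List Bool)) (x y : Int) : List (List Bool) :=
  v.modify x.toNat (fun row => row.set y.toNat true)

-- min/max with float('inf') / float('-inf') start: none plays ±inf (only ever compared, never returned)
def pvOmin (o : Option Int) (y : Int) : Option Int :=
  match o with | none => some y | some v => some (min v y)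
def pvOmax (o : Option Int) (y : Int) : Option Int :=
  match o with | none => some y | some v => some (max v y)

def pvDeltas : List (Int × Int) := [(-1, 0), (1, 0), (0, -1), (0, 1)]

-- the `while queue:` loop of bfs; fuel only makes the recursion total (n*m bounds the pops)
def pvBfsLoop (land : List (List Int)) (n m : Int) (fuel : Nat) (visited : List (List Bool))
    (queue : List (Int × Int)) (amount : Int) (sy ey : Option Int) :
    List (List Bool) × Int × Option Int × Option Int :=
  match queue, fuel with
  | [], _ => (visited, amount, sy, ey)
  | _ :: _, 0 => (visited, amount, sy, ey)
  | (cx, cy) :: rest, fuel + 1 =>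
    let st := pvDeltas.foldl (fun (p : List (List Bool) × List (Int × Int)) d =>
      let nx := cx + d.1
      let ny := cy + d.2
      if 0 ≤ nx ∧ nx < n ∧ 0 ≤ ny ∧ ny < m ∧ pvVget p.1 nx ny = false ∧ pvLandAt land nx ny = 1
      then (pvVset p.1 nx ny, p.2 ++ [(nx, ny)])
      else p) (visited, rest)
    pvBfsLoop land n m fuel st.1 st.2 (amount + 1) (pvOmin sy cy) (pvOmax ey cy)

-- bfs(x, y, visited, n, m, land, result): returns the updated (visited, result)
def pvBfs (land : List (List Int)) (n m x y : Int) (visited : List (List Bool))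
    (result : List Int) : List (List Bool) × List Int :=
  let st := pvBfsLoop land n m (n.toNat * m.toNat) (pvVset visited x y) [(x, y)] 0 none none
  let amount := st.2.1
  -- at least one pop happens, so startY/endY are ints here (never ±inf), as in Python
  let startY := st.2.2.1.getD 0
  let endY := st.2.2.2.getD 0
  (st.1, (PySem.List.pyRange startY (endY + 1) 1).foldl
        (fun r col => r.modify col.toNat (fun v => v + amount)) result)

def solution (land : List (List Int)) : Int :=
  let n : Int := land.length
  let m : Int := (((PySem.List.pyGet? land 0).getD []) : List Int).length
  let visited : List (List Bool) :=
    (PySem.List.pyRange 0 n 1).map (fun _ => (PySem.List.pyRange 0 m 1).map (fun _ => false))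
  let result : List Int := (PySem.List.pyRange 0 m 1).map (fun _ => (0 : Int))
  let st := (PySem.List.pyRange 0 n 1).foldl (fun st i =>
    (PySem.List.pyRange 0 m 1).foldl (fun (st : List (List Bool) × List Int) j =>
      if pvVget st.1 i j = false ∧ pvLandAt land i j = 1
      then pvBfs land n m i j st.1 st.2
      else st) st) (visited, result)
  (PySem.List.max? st.2 (fun v => v)).getD 0   -- max(result); nonempty under Pre_solution


-- ===== PORT B =====
def pvNbrs (x y : Int) : List (Int × Int) := [(x - 1, y), (x + 1, y), (x, y - 1), (x, y + 1)]

-- the `while stack:` DFS loop; pops the last element, collects the popped cells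
def pvDfsLoop (land : List (List Int)) (n m : Int) (fuel : Nat) (seen : List (List Bool))
    (stack cells : List (Int × Int)) : List (List Bool) × List (Int × Int) :=
  match fuel with
  | 0 => (seen, cells)
  | fuel + 1 =>
    match stack.getLast? with
    | none => (seen, cells)
    | some c =>
      let rest := stack.dropLast
      let st := (pvNbrs c.1 c.2).foldl (fun (p : List (List Bool) × List (Int × Int)) d =>
        if 0 ≤ d.1 ∧ d.1 < n ∧ 0 ≤ d.2 ∧ d.2 < m ∧ pvLandAt land d.1 d.2 = 1 ∧ pvVget p.1 d.1 d.2 = false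
        then (pvVset p.1 d.1 d.2, p.2 ++ [d])
        else p) (seen, rest)
      pvDfsLoop land n m fuel st.1 st.2 (cells ++ [c])

def pvSpanOf (comp : List (Int × Int)) : Int × Int × Int :=
  ((PySem.List.min? (comp.map Prod.snd) (fun y => y)).getD 0,
   (PySem.List.max? (comp.map Prod.snd) (fun y => y)).getD 0,
   (comp.length : Int))   -- (min, max, len); comps are nonempty so the defaults never matter

def pvColSum (spans : List (Int × Int × Int)) (c : Int) : Int :=
  spans.foldl (fun acc t => if t.1 ≤ c ∧ c ≤ t.2.1 then acc + t.2.2 else acc) 0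

def solution_alt (land : List (List Int)) : Int :=
  let n : Int := land.length
  let m : Int := (((PySem.List.pyGet? land 0).getD []) : List Int).length
  let seen : List (List Bool) := List.replicate n.toNat (List.replicate m.toNat false)
  let st := (PySem.List.pyRange 0 n 1).foldl (fun st i =>
    (PySem.List.pyRange 0 m 1).foldl (fun (st : List (List Bool) × List (List (Int × Int))) j =>
      if pvLandAt land i j = 1 ∧ pvVget st.1 i j = false
      then
        let r := pvDfsLoop land n m (n.toNat * m.toNat) (pvVset st.1 i j) [(i, j)] []
        (r.1, st.2 ++ [r.2])
      else st) st) (seen, [])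
  let spans := st.2.map pvSpanOf
  (PySem.List.max? ((PySem.List.pyRange 0 m 1).map (fun c => pvColSum spans c)) (fun v => v)).getD 0


-- ===== PRECONDITION & SPEC =====
-- Pre_solution holds exactly where the Python returns: land nonempty (land[0] is read), the first row
-- nonempty (max(result) needs m > 0), and every row at least as long as the first (land[i][j], j < m).
def Pre_solution (land : List (List Int)) : Prop :=
  land ≠ [] ∧ 0 < (land.head?.getD []).length ∧
    ∀ row ∈ land, (land.head?.getD []).length ≤ row.length
instance (land : List (List Int)) : Decidable (Pre_solution land) := by
  unfold Pre_solution; infer_instance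
def pvWitness_solution : List (List Int) := [[1, 0], [1, 1]]

def Spec_solution (land : List (List Int)) (out : Int) : Prop := out = solution_alt land
instance (land : List (List Int)) (out : Int) : Decidable (Spec_solution land out) := by
  unfold Spec_solution; infer_instance

-- ===== CLAIM (what is proved, stated in full; the proofs are below) =====
def Claim_equal_solution : Prop := ∀ (land : List (List Int)), Dom_solution land → Pre_solution land → Spec_solution land (solution land)

-- ===== LEMMAS AND PROOFS =====
-- ---- basic notions ----
def pvInb (n m : Int) (c : Int × Int) : Prop := 0 ≤ c.1 ∧ c.1 < n ∧ 0 ≤ c.2 ∧ c.2 < m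

def pvGood (land : List (List Int)) (n m : Int) (V : List (List Bool)) (c : Int × Int) : Prop :=
  pvInb n m c ∧ pvLandAt land c.1 c.2 = 1 ∧ pvVget V c.1 c.2 = false

inductive pvReach (g : Int × Int → Prop) (q : List (Int × Int)) : Int × Int → Prop
  | base {c} : c ∈ q → pvReach g q c
  | step {c d} : pvReach g q c → d ∈ pvNbrs c.1 c.2 → g d → pvReach g q d

def pvCellP (g : Int × Int → Prop) (q : List (Int × Int)) (d : Int × Int) : Prop :=
  d ∈ q ∨ (g d ∧ pvReach g q d)

def pvShape (v : List (List Bool)) (n m : Int) : Prop :=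
  (v.length : Int) = n ∧ ∀ row ∈ v, (row.length : Int) = m

-- ---- vget / vset ----
theorem pvVget_nonneg (v : List (List Bool)) (a b : Int) (ha : 0 ≤ a) (hb : 0 ≤ b) :
    pvVget v a b = ((v[a.toNat]?.getD [])[b.toNat]?.getD false) := by
  simp [pvVget, PySem.List.pyGet?_of_nonneg _ ha, PySem.List.pyGet?_of_nonneg _ hb]

theorem pvShape_pvVset (v : List (List Bool)) (n m x y : Int) (hs : pvShape v n m) :
    pvShape (pvVset v x y) n m := by
  obtain ⟨h1, h2⟩ := hs
  refine ⟨by simpa [pvVset, List.length_modify], ?_⟩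
  intro row hrow
  rw [List.mem_iff_getElem] at hrow
  obtain ⟨k, hk, hrow⟩ := hrow
  unfold pvVset at hrow
  rw [List.getElem_modify] at hrow
  split at hrow
  · have hk' : k < v.length := by simpa [pvVset, List.length_modify] using hk
    have := h2 (v[k]) (List.getElem_mem hk')
    rw [← hrow]
    simpa [List.length_set] using this
  · have hk' : k < v.length := by simpa [pvVset, List.length_modify] using hk
    exact hrow ▸ h2 (v[k]) (List.getElem_mem hk')

theorem pvVget_pvVset (v : List (List Bool)) (n m x y a b : Int) (hs : pvShape v n m)
    (hxy : pvInb n m (x, y)) (ha : 0 ≤ a) (hb : 0 ≤ b) :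
    pvVget (pvVset v x y) a b = if a = x ∧ b = y then true else pvVget v a b := by
  obtain ⟨hx0, hxn, hy0, hym⟩ := hxy
  simp only at hx0 hxn hy0 hym
  obtain ⟨hlen, hrows⟩ := hs
  rw [pvVget_nonneg _ _ _ ha hb]
  unfold pvVset
  rw [List.getElem?_modify]
  have hxlt : x.toNat < v.length := by omega
  by_cases hax : a = x
  · subst hax
    have hsome : v[a.toNat]? = some v[a.toNat] := List.getElem?_eq_getElem hxlt
    have hrl : (v[a.toNat].length : Int) = m := hrows _ (List.getElem_mem hxlt)
    have hylt : y.toNat < v[a.toNat].length := by omega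
    by_cases hby : b = y
    · subst hby
      simp [hsome, hylt]
    · have hne : y.toNat ≠ b.toNat := by omega
      simp [hsome, hne, hby, pvVget_nonneg _ _ _ ha hb]
  · have hne : x.toNat ≠ a.toNat := by omega
    simp [hne, hax, pvVget_nonneg _ _ _ ha hb]

theorem pvGrid_ext (v w : List (List Bool)) (n m : Int) (h1 : pvShape v n m)
    (h2 : pvShape w n m) (h : ∀ a b : Nat, pvVget v a b = pvVget w a b) : v = w := by
  obtain ⟨hv1, hv2⟩ := h1
  obtain ⟨hw1, hw2⟩ := h2
  apply List.ext_getElem (by omega)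
  intro i hi1 hi2
  have hri : (v[i].length : Int) = m := hv2 _ (List.getElem_mem hi1)
  have hwi : (w[i].length : Int) = m := hw2 _ (List.getElem_mem hi2)
  apply List.ext_getElem (by omega)
  intro j hj1 hj2
  have hh := h i j
  rw [pvVget_nonneg _ _ _ (by omega) (by omega), pvVget_nonneg _ _ _ (by omega) (by omega)] at hh
  simpa [List.getElem?_eq_getElem, hi1, hi2, hj1, hj2] using hh

-- ---- generic push fold ----
theorem pvFold_push (land : List (List Int)) (n m : Int)
    (F : (List (List Bool) × List (Int × Int)) → (Int × Int) → (List (List Bool) × List (Int × Int)))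
    (hFt : ∀ p c, pvGood land n m p.1 c → F p c = (pvVset p.1 c.1 c.2, p.2 ++ [c]))
    (hFf : ∀ p c, ¬ pvGood land n m p.1 c → F p c = p) :
    ∀ (ds : List (Int × Int)) (V : List (List Bool)) (q : List (Int × Int)),
      pvShape V n m → ds.Nodup →
      ∃ N : List (Int × Int),
        (ds.foldl F (V, q)).2 = q ++ N ∧ N.Nodup ∧
        (∀ d, d ∈ N ↔ d ∈ ds ∧ pvGood land n m V d) ∧
        pvShape (ds.foldl F (V, q)).1 n m ∧
        (∀ a b : Int, 0 ≤ a → 0 ≤ b →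
          (pvVget (ds.foldl F (V, q)).1 a b = true ↔
            (pvVget V a b = true ∨ (a, b) ∈ N))) := by
  intro ds
  induction ds with
  | nil =>
    intro V q hs _
    exact ⟨[], by simp, List.nodup_nil, by simp, hs, fun a b _ _ => by simp⟩
  | cons d ds ih =>
    intro V q hs hnd
    rw [List.nodup_cons] at hnd
    obtain ⟨hd, hnd⟩ := hnd
    by_cases hg : pvGood land n m V d
    · rw [List.foldl_cons, hFt (V, q) d hg]
      obtain ⟨hin, hoil, hvf⟩ := hg
      have hg : pvGood land n m V d := ⟨hin, hoil, hvf⟩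
      have hsV2 : pvShape (pvVset V d.1 d.2) n m := pvShape_pvVset _ _ _ _ _ hs
      obtain ⟨N, hq2, hNnd, hNmem, hsh, hvg⟩ := ih (pvVset V d.1 d.2) (q ++ [d]) hsV2 hnd
      have hvset : ∀ a b : Int, 0 ≤ a → 0 ≤ b →
          pvVget (pvVset V d.1 d.2) a b = if a = d.1 ∧ b = d.2 then true else pvVget V a b := by
        intro a b ha hb
        exact pvVget_pvVset V n m d.1 d.2 a b hs hin ha hb
      have hgood_iff : ∀ e ∈ ds, (pvGood land n m (pvVset V d.1 d.2) e ↔ pvGood land n m V e) := by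
        intro e he
        have hed : e ≠ d := fun h => hd (h ▸ he)
        have hedc : ¬ (e.1 = d.1 ∧ e.2 = d.2) := by
          rintro ⟨h1, h2⟩; exact hed (Prod.ext h1 h2)
        constructor
        · rintro ⟨hi, ho, hv⟩
          rw [hvset e.1 e.2 hi.1 hi.2.2.1, if_neg hedc] at hv
          exact ⟨hi, ho, hv⟩
        · rintro ⟨hi, ho, hv⟩
          refine ⟨hi, ho, ?_⟩
          rw [hvset e.1 e.2 hi.1 hi.2.2.1, if_neg hedc]
          exact hv
      refine ⟨d :: N, ?_, ?_, ?_, hsh, ?_⟩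
      · rw [hq2]; simp
      · refine List.nodup_cons.2 ⟨?_, hNnd⟩
        intro hdN
        exact hd ((hNmem d).1 hdN).1
      · intro e
        rw [List.mem_cons, List.mem_cons, hNmem e]
        constructor
        · rintro (rfl | ⟨hds, hge⟩)
          · exact ⟨Or.inl rfl, hg⟩
          · exact ⟨Or.inr hds, (hgood_iff e hds).1 hge⟩
        · rintro ⟨rfl | hds, hge⟩
          · exact Or.inl rfl
          · exact Or.inr ⟨hds, (hgood_iff e hds).2 hge⟩
      · intro a b ha hb
        rw [hvg a b ha hb, hvset a b ha hb]
        by_cases hab : a = d.1 ∧ b = d.2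
        · have habd : (a, b) = d := Prod.ext hab.1 hab.2
          simp [hab]
        · have habd : (a, b) ≠ d := by
            rintro rfl; exact hab ⟨rfl, rfl⟩
          simp [hab, habd]
    · rw [List.foldl_cons, hFf (V, q) d hg]
      obtain ⟨N, hq2, hNnd, hNmem, hsh, hvg⟩ := ih V q hs hnd
      refine ⟨N, hq2, hNnd, ?_, hsh, hvg⟩
      intro e
      rw [hNmem e, List.mem_cons]
      constructor
      · rintro ⟨hds, hge⟩
        exact ⟨Or.inr hds, hge⟩
      · rintro ⟨rfl | hds, hge⟩
        · exact absurd hge hg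
        · exact ⟨hds, hge⟩

-- ---- reachability step ----
theorem pvReach_nil (g : Int × Int → Prop) (d : Int × Int) : ¬ pvReach g [] d := by
  intro h; induction h with
  | base h => simp at h
  | step _ _ _ ih => exact ih

theorem pvReach_mono (g g' : Int × Int → Prop) (q' q₂ : List (Int × Int))
    (hg : ∀ x, g' x → g x) (hq : ∀ x ∈ q', pvReach g q₂ x) {d}
    (h : pvReach g' q' d) : pvReach g q₂ d := by
  induction h with
  | base h => exact hq _ h
  | step _ hn hgd ih => exact pvReach.step ih hn (hg _ hgd)

theorem pvCellP_step (g g' : Int × Int → Prop) (c : Int × Int)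
    (rest N q₀ q' : List (Int × Int))
    (hq₀ : ∀ e, e ∈ q₀ ↔ e = c ∨ e ∈ rest)
    (hq' : ∀ e, e ∈ q' ↔ e ∈ rest ∨ e ∈ N)
    (hN : ∀ e, e ∈ N ↔ e ∈ pvNbrs c.1 c.2 ∧ g e)
    (hg' : ∀ e, g' e ↔ g e ∧ e ∉ N)
    (hc : ¬ g c) (hcr : c ∉ rest) :
    ∀ d, pvCellP g' q' d ↔ (pvCellP g q₀ d ∧ d ≠ c) := by
  have aux : ∀ d, pvReach g q₀ d → d = c ∨ pvReach g' q' d := by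
    intro d h
    induction h with
    | base hb =>
      rcases (hq₀ _).1 hb with h | h
      · exact Or.inl h
      · exact Or.inr (pvReach.base ((hq' _).2 (Or.inl h)))
    | @step e d hr hn hgd ih =>
      by_cases hdN : d ∈ N
      · exact Or.inr (pvReach.base ((hq' _).2 (Or.inr hdN)))
      · rcases ih with rfl | hre
        · exact absurd ((hN d).2 ⟨hn, hgd⟩) hdN
        · exact Or.inr (pvReach.step hre hn ((hg' d).2 ⟨hgd, hdN⟩))
  intro d
  constructor
  · rintro (hq | ⟨hgd, hr⟩)
    · rcases (hq' _).1 hq with h | h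
      · refine ⟨Or.inl ((hq₀ _).2 (Or.inr h)), ?_⟩
        rintro rfl; exact hcr h
      · obtain ⟨hnb, hgd⟩ := (hN _).1 h
        refine ⟨Or.inr ⟨hgd, pvReach.step (pvReach.base ((hq₀ _).2 (Or.inl rfl))) hnb hgd⟩, ?_⟩
        rintro rfl; exact hc hgd
    · have hgd2 := ((hg' _).1 hgd).1
      have hr2 : pvReach g q₀ d := by
        refine pvReach_mono g g' q' q₀ (fun x hx => ((hg' x).1 hx).1) ?_ hr
        intro x hx
        rcases (hq' _).1 hx with h | h
        · exact pvReach.base ((hq₀ _).2 (Or.inr h))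
        · obtain ⟨hnb, hgx⟩ := (hN _).1 h
          exact pvReach.step (pvReach.base ((hq₀ _).2 (Or.inl rfl))) hnb hgx
      refine ⟨Or.inr ⟨hgd2, hr2⟩, ?_⟩
      rintro rfl; exact hc hgd2
  · rintro ⟨hq | ⟨hgd, hr⟩, hdc⟩
    · rcases (hq₀ _).1 hq with rfl | h
      · exact absurd rfl hdc
      · exact Or.inl ((hq' _).2 (Or.inl h))
    · by_cases hdN : d ∈ N
      · exact Or.inl ((hq' _).2 (Or.inr hdN))
      · rcases aux d hr with rfl | hr2
        · exact absurd rfl hdc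
        · exact Or.inr ⟨(hg' d).2 ⟨hgd, hdN⟩, hr2⟩

-- ---- option min/max folds ----
theorem pvOmin_rc (o : Option Int) (a b : Int) :
    pvOmin (pvOmin o a) b = pvOmin (pvOmin o b) a := by
  rcases o with _ | v <;> simp [pvOmin, min_comm, min_left_comm]

theorem pvOmax_rc (o : Option Int) (a b : Int) :
    pvOmax (pvOmax o a) b = pvOmax (pvOmax o b) a := by
  rcases o with _ | v <;> simp [pvOmax, max_comm, max_left_comm]

theorem pvOmin_foldl_some (t : List Int) (a : Int) :
    t.foldl pvOmin (some a) = some (t.foldl min a) := by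
  induction t generalizing a with
  | nil => rfl
  | cons x t ih => simp [pvOmin, ih]

theorem pvOmax_foldl_some (t : List Int) (a : Int) :
    t.foldl pvOmax (some a) = some (t.foldl max a) := by
  induction t generalizing a with
  | nil => rfl
  | cons x t ih => simp [pvOmax, ih]

-- ---- neighbour list facts and the cell-level push function ----
theorem pvNbrs_nodup (x y : Int) : (pvNbrs x y).Nodup := by
  simp [pvNbrs, Prod.ext_iff]
  omega

theorem pvDeltas_map (cx cy : Int) :
    pvDeltas.map (fun d => (cx + d.1, cy + d.2)) = pvNbrs cx cy := by
  simp only [pvDeltas, pvNbrs, List.map_cons, List.map_nil]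
  norm_num
  omega

def pvF (land : List (List Int)) (n m : Int)
    (p : List (List Bool) × List (Int × Int)) (c : Int × Int) :
    List (List Bool) × List (Int × Int) :=
  if 0 ≤ c.1 ∧ c.1 < n ∧ 0 ≤ c.2 ∧ c.2 < m ∧ pvVget p.1 c.1 c.2 = false ∧ pvLandAt land c.1 c.2 = 1
  then (pvVset p.1 c.1 c.2, p.2 ++ [c]) else p

theorem pvF_good (land : List (List Int)) (n m : Int)
    (p : List (List Bool) × List (Int × Int)) (c : Int × Int)
    (h : pvGood land n m p.1 c) : pvF land n m p c = (pvVset p.1 c.1 c.2, p.2 ++ [c]) := by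
  obtain ⟨⟨h1, h2, h3, h4⟩, ho, hv⟩ := h
  rw [pvF, if_pos ⟨h1, h2, h3, h4, hv, ho⟩]

theorem pvF_bad (land : List (List Int)) (n m : Int)
    (p : List (List Bool) × List (Int × Int)) (c : Int × Int)
    (h : ¬ pvGood land n m p.1 c) : pvF land n m p c = p := by
  rw [pvF, if_neg]
  rintro ⟨h1, h2, h3, h4, hv, ho⟩
  exact h ⟨⟨h1, h2, h3, h4⟩, ho, hv⟩

-- the same cell-level function, with B's guard order (land before seen)
def pvG (land : List (List Int)) (n m : Int)
    (p : List (List Bool) × List (Int × Int)) (c : Int × Int) :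
    List (List Bool) × List (Int × Int) :=
  if 0 ≤ c.1 ∧ c.1 < n ∧ 0 ≤ c.2 ∧ c.2 < m ∧ pvLandAt land c.1 c.2 = 1 ∧ pvVget p.1 c.1 c.2 = false
  then (pvVset p.1 c.1 c.2, p.2 ++ [c]) else p

theorem pvG_good (land : List (List Int)) (n m : Int)
    (p : List (List Bool) × List (Int × Int)) (c : Int × Int)
    (h : pvGood land n m p.1 c) : pvG land n m p c = (pvVset p.1 c.1 c.2, p.2 ++ [c]) := by
  obtain ⟨⟨h1, h2, h3, h4⟩, ho, hv⟩ := h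
  rw [pvG, if_pos ⟨h1, h2, h3, h4, ho, hv⟩]

theorem pvG_bad (land : List (List Int)) (n m : Int)
    (p : List (List Bool) × List (Int × Int)) (c : Int × Int)
    (h : ¬ pvGood land n m p.1 c) : pvG land n m p c = p := by
  rw [pvG, if_neg]
  rintro ⟨h1, h2, h3, h4, ho, hv⟩
  exact h ⟨⟨h1, h2, h3, h4⟩, ho, hv⟩

-- derived facts shared by the two closed-form proofs
theorem pvStep_core (land : List (List Int)) (n m : Int) (V : List (List Bool))
    (cx cy : Int) (rest N : List (Int × Int)) (W : List (List Bool))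
    (hrest : ∀ c ∈ rest, pvInb n m c ∧ pvVget V c.1 c.2 = true)
    (hrestnd : rest.Nodup)
    (hNnd : N.Nodup)
    (hNmem : ∀ e, e ∈ N ↔ e ∈ pvNbrs cx cy ∧ pvGood land n m V e)
    (hvg2 : ∀ a b : Int, 0 ≤ a → 0 ≤ b →
      (pvVget W a b = true ↔ (pvVget V a b = true ∨ (a, b) ∈ N))) :
    (∀ e, pvGood land n m W e ↔ pvGood land n m V e ∧ e ∉ N) ∧
    (∀ c ∈ rest ++ N, pvInb n m c ∧ pvVget W c.1 c.2 = true) ∧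
    (rest ++ N).Nodup := by
  have hgood' : ∀ e, pvGood land n m W e ↔ pvGood land n m V e ∧ e ∉ N := by
    intro e
    constructor
    · rintro ⟨hi, ho, hv⟩
      have hvt := hvg2 e.1 e.2 hi.1 hi.2.2.1
      have hnot : ¬ (pvVget V e.1 e.2 = true ∨ (e.1, e.2) ∈ N) := by
        rw [← hvt, hv]; simp
      push Not at hnot
      refine ⟨⟨hi, ho, by simpa using hnot.1⟩, by simpa using hnot.2⟩
    · rintro ⟨⟨hi, ho, hv⟩, hNo⟩
      refine ⟨hi, ho, ?_⟩
      cases hW : pvVget W e.1 e.2 with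
      | false => rfl
      | true =>
        rcases (hvg2 e.1 e.2 hi.1 hi.2.2.1).1 hW with h | h
        · rw [hv] at h; cases h
        · exact absurd (by simpa using h) hNo
  refine ⟨hgood', ?_, ?_⟩
  · intro e he
    rcases List.mem_append.1 he with h | h
    · obtain ⟨hi, hv⟩ := hrest e h
      exact ⟨hi, (hvg2 e.1 e.2 hi.1 hi.2.2.1).2 (Or.inl hv)⟩
    · obtain ⟨hi, ho, hv⟩ := ((hNmem e).1 h).2
      exact ⟨hi, (hvg2 e.1 e.2 hi.1 hi.2.2.1).2 (Or.inr (by simpa using h))⟩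
  · refine List.Nodup.append hrestnd hNnd ?_
    intro e he1 he2
    obtain ⟨_, hv⟩ := hrest e he1
    obtain ⟨_, _, hv2⟩ := ((hNmem e).1 he2).2
    rw [hv] at hv2; cases hv2

-- ---- the closed form of the BFS loop ----
theorem pvBfs_closed (land : List (List Int)) (n m : Int) :
    ∀ (fuel : Nat) (V : List (List Bool)) (q : List (Int × Int)) (amount : Int)
      (sy ey : Option Int) (L : List (Int × Int)),
      pvShape V n m →
      (∀ c ∈ q, pvInb n m c ∧ pvVget V c.1 c.2 = true) →
      q.Nodup → L.Nodup →
      (∀ d, d ∈ L ↔ pvCellP (pvGood land n m V) q d) →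
      L.length ≤ fuel →
      pvShape (pvBfsLoop land n m fuel V q amount sy ey).1 n m ∧
      (∀ a b : Int, 0 ≤ a → 0 ≤ b →
        (pvVget (pvBfsLoop land n m fuel V q amount sy ey).1 a b = true ↔
          (pvVget V a b = true ∨ (a, b) ∈ L))) ∧
      (pvBfsLoop land n m fuel V q amount sy ey).2.1 = amount + L.length ∧
      (pvBfsLoop land n m fuel V q amount sy ey).2.2.1 = L.foldl (fun o c => pvOmin o c.2) sy ∧
      (pvBfsLoop land n m fuel V q amount sy ey).2.2.2 = L.foldl (fun o c => pvOmax o c.2) ey := by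
  intro fuel
  induction fuel with
  | zero =>
    intro V q amount sy ey L hs hq hqnd hLnd hL hlen
    have hL0 : L = [] := List.eq_nil_of_length_eq_zero (Nat.le_zero.1 hlen)
    subst hL0
    cases q with
    | nil => exact ⟨hs, fun a b _ _ => by simp [pvBfsLoop], by simp [pvBfsLoop], by simp [pvBfsLoop], by simp [pvBfsLoop]⟩
    | cons c rest =>
      obtain ⟨cx, cy⟩ := c
      exact ⟨hs, fun a b _ _ => by simp [pvBfsLoop], by simp [pvBfsLoop], by simp [pvBfsLoop], by simp [pvBfsLoop]⟩
  | succ fuel ih =>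
    intro V q amount sy ey L hs hq hqnd hLnd hL hlen
    cases q with
    | nil =>
      have hL0 : L = [] := by
        rw [List.eq_nil_iff_forall_not_mem]
        intro d hd
        rcases (hL d).1 hd with h | ⟨_, hr⟩
        · simp at h
        · exact pvReach_nil _ _ hr
      subst hL0
      exact ⟨hs, fun a b _ _ => by simp [pvBfsLoop], by simp [pvBfsLoop], by simp [pvBfsLoop], by simp [pvBfsLoop]⟩
    | cons c rest =>
      obtain ⟨cx, cy⟩ := c
      obtain ⟨hcin, hcvis⟩ := hq (cx, cy) List.mem_cons_self
      rw [List.nodup_cons] at hqnd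
      obtain ⟨hcr, hrestnd⟩ := hqnd
      have hrest : ∀ e ∈ rest, pvInb n m e ∧ pvVget V e.1 e.2 = true :=
        fun e he => hq e (List.mem_cons_of_mem _ he)
      have hfold : pvDeltas.foldl
          (fun (p : List (List Bool) × List (Int × Int)) d =>
            let nx := cx + d.1
            let ny := cy + d.2
            if 0 ≤ nx ∧ nx < n ∧ 0 ≤ ny ∧ ny < m ∧ pvVget p.1 nx ny = false ∧ pvLandAt land nx ny = 1
            then (pvVset p.1 nx ny, p.2 ++ [(nx, ny)]) else p) (V, rest)
          = (pvNbrs cx cy).foldl (pvF land n m) (V, rest) := by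
        rw [← pvDeltas_map cx cy, List.foldl_map]
        rfl
      have hstep : pvBfsLoop land n m (fuel + 1) V ((cx, cy) :: rest) amount sy ey
          = pvBfsLoop land n m fuel ((pvNbrs cx cy).foldl (pvF land n m) (V, rest)).1
              ((pvNbrs cx cy).foldl (pvF land n m) (V, rest)).2
              (amount + 1) (pvOmin sy cy) (pvOmax ey cy) := by
        rw [pvBfsLoop, hfold]
      obtain ⟨N, hq2, hNnd, hNmem, hsh2, hvg2⟩ :=
        pvFold_push land n m (pvF land n m) (pvF_good land n m) (pvF_bad land n m)
          (pvNbrs cx cy) V rest hs (pvNbrs_nodup cx cy)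
      obtain ⟨hgood', hq', hnd'⟩ :=
        pvStep_core land n m V cx cy rest N ((pvNbrs cx cy).foldl (pvF land n m) (V, rest)).1
          hrest hrestnd hNnd hNmem hvg2
      have hcrux := pvCellP_step (pvGood land n m V)
        (pvGood land n m ((pvNbrs cx cy).foldl (pvF land n m) (V, rest)).1) (cx, cy)
        rest N ((cx, cy) :: rest) (rest ++ N)
        (fun e => List.mem_cons)
        (fun e => List.mem_append)
        (fun e => hNmem e)
        hgood'
        (by rintro ⟨_, _, hv⟩; rw [hcvis] at hv; cases hv)
        hcr
      have hcL : (cx, cy) ∈ L := (hL _).2 (Or.inl List.mem_cons_self)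
      have hL' : ∀ d, d ∈ L.erase (cx, cy) ↔
          pvCellP (pvGood land n m ((pvNbrs cx cy).foldl (pvF land n m) (V, rest)).1) (rest ++ N) d := by
        intro d
        rw [List.Nodup.mem_erase_iff hLnd, hcrux d, hL d]
        tauto
      obtain ⟨ihsh, ihvg, ihamt, ihsy, ihey⟩ :=
        ih ((pvNbrs cx cy).foldl (pvF land n m) (V, rest)).1 (rest ++ N) (amount + 1)
          (pvOmin sy cy) (pvOmax ey cy) (L.erase (cx, cy)) hsh2 hq' hnd'
          (List.Nodup.erase _ hLnd) hL'
          (by rw [List.length_erase_of_mem hcL]; omega)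
      have hlpos : 0 < L.length := List.length_pos_of_mem hcL
      rw [hstep, hq2]
      refine ⟨ihsh, ?_, ?_, ?_, ?_⟩
      · intro a b ha hb
        rw [ihvg a b ha hb, hvg2 a b ha hb]
        by_cases hab : (a, b) = (cx, cy)
        · have ha2 : a = cx := congrArg Prod.fst hab
          have hb2 : b = cy := congrArg Prod.snd hab
          subst ha2; subst hb2
          simp [hcvis, hcL]
        · have hNL : (a, b) ∈ N → (a, b) ∈ L := fun h =>
            (hL _).2 (Or.inr ⟨((hNmem _).1 h).2,
              pvReach.step (pvReach.base List.mem_cons_self) ((hNmem _).1 h).1 ((hNmem _).1 h).2⟩)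
          rw [List.Nodup.mem_erase_iff hLnd]
          constructor
          · rintro ((h | h) | h)
            · exact Or.inl h
            · exact Or.inr (hNL h)
            · exact Or.inr h.2
          · rintro (h | h)
            · exact Or.inl (Or.inl h)
            · exact Or.inr ⟨hab, h⟩
      · rw [ihamt, List.length_erase_of_mem hcL]
        omega
      · rw [ihsy]
        letI : RightCommutative (fun (o : Option Int) (c : Int × Int) => pvOmin o c.2) :=
          ⟨fun o a b => pvOmin_rc o a.2 b.2⟩
        rw [(List.perm_cons_erase hcL).foldl_eq sy]
        rfl
      · rw [ihey]
        letI : RightCommutative (fun (o : Option Int) (c : Int × Int) => pvOmax o c.2) :=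
          ⟨fun o a b => pvOmax_rc o a.2 b.2⟩
        rw [(List.perm_cons_erase hcL).foldl_eq ey]
        rfl

-- ---- the closed form of the DFS loop ----
theorem pvDfs_closed (land : List (List Int)) (n m : Int) :
    ∀ (fuel : Nat) (V : List (List Bool)) (stack cells : List (Int × Int))
      (L : List (Int × Int)),
      pvShape V n m →
      (∀ c ∈ stack, pvInb n m c ∧ pvVget V c.1 c.2 = true) →
      stack.Nodup → L.Nodup →
      (∀ d, d ∈ L ↔ pvCellP (pvGood land n m V) stack d) →
      L.length ≤ fuel →
      pvShape (pvDfsLoop land n m fuel V stack cells).1 n m ∧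
      (∀ a b : Int, 0 ≤ a → 0 ≤ b →
        (pvVget (pvDfsLoop land n m fuel V stack cells).1 a b = true ↔
          (pvVget V a b = true ∨ (a, b) ∈ L))) ∧
      ∃ popL : List (Int × Int),
        (pvDfsLoop land n m fuel V stack cells).2 = cells ++ popL ∧ popL.Perm L := by
  intro fuel
  induction fuel with
  | zero =>
    intro V stack cells L hs hq hqnd hLnd hL hlen
    have hL0 : L = [] := List.eq_nil_of_length_eq_zero (Nat.le_zero.1 hlen)
    subst hL0
    exact ⟨hs, fun a b _ _ => by simp [pvDfsLoop], [], by simp [pvDfsLoop], List.Perm.refl []⟩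
  | succ fuel ih =>
    intro V stack cells L hs hq hqnd hLnd hL hlen
    cases hlast : stack.getLast? with
    | none =>
      rw [List.getLast?_eq_none_iff] at hlast
      subst hlast
      have hL0 : L = [] := by
        rw [List.eq_nil_iff_forall_not_mem]
        intro d hd
        rcases (hL d).1 hd with h | ⟨_, hr⟩
        · simp at h
        · exact pvReach_nil _ _ hr
      subst hL0
      exact ⟨hs, fun a b _ _ => by simp [pvDfsLoop], [], by simp [pvDfsLoop], List.Perm.refl []⟩
    | some c =>
      obtain ⟨rest, rfl⟩ := List.getLast?_eq_some_iff.1 hlast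
      obtain ⟨cx, cy⟩ := c
      have hcmem : (cx, cy) ∈ rest ++ [(cx, cy)] := by simp
      obtain ⟨hcin, hcvis⟩ := hq (cx, cy) hcmem
      have hrestnd : rest.Nodup := (List.nodup_append.1 hqnd).1
      have hcr : (cx, cy) ∉ rest := by
        intro h
        exact (List.nodup_append.1 hqnd).2.2 _ h _ (by simp) rfl
      have hrest : ∀ e ∈ rest, pvInb n m e ∧ pvVget V e.1 e.2 = true :=
        fun e he => hq e (List.mem_append_left _ he)
      have hstep : pvDfsLoop land n m (fuel + 1) V (rest ++ [(cx, cy)]) cells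
          = pvDfsLoop land n m fuel ((pvNbrs cx cy).foldl (pvG land n m) (V, rest)).1
              ((pvNbrs cx cy).foldl (pvG land n m) (V, rest)).2 (cells ++ [(cx, cy)]) := by
        rw [pvDfsLoop, hlast]
        rw [List.dropLast_concat]
        rfl
      obtain ⟨N, hq2, hNnd, hNmem, hsh2, hvg2⟩ :=
        pvFold_push land n m (pvG land n m) (pvG_good land n m) (pvG_bad land n m)
          (pvNbrs cx cy) V rest hs (pvNbrs_nodup cx cy)
      obtain ⟨hgood', hq', hnd'⟩ :=
        pvStep_core land n m V cx cy rest N ((pvNbrs cx cy).foldl (pvG land n m) (V, rest)).1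
          hrest hrestnd hNnd hNmem hvg2
      have hcrux := pvCellP_step (pvGood land n m V)
        (pvGood land n m ((pvNbrs cx cy).foldl (pvG land n m) (V, rest)).1) (cx, cy)
        rest N (rest ++ [(cx, cy)]) (rest ++ N)
        (fun e => by simp [or_comm])
        (fun e => List.mem_append)
        (fun e => hNmem e)
        hgood'
        (by rintro ⟨_, _, hv⟩; rw [hcvis] at hv; cases hv)
        hcr
      have hcL : (cx, cy) ∈ L := (hL _).2 (Or.inl hcmem)
      have hL' : ∀ d, d ∈ L.erase (cx, cy) ↔
          pvCellP (pvGood land n m ((pvNbrs cx cy).foldl (pvG land n m) (V, rest)).1) (rest ++ N) d := by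
        intro d
        rw [List.Nodup.mem_erase_iff hLnd, hcrux d, hL d]
        tauto
      obtain ⟨ihsh, ihvg, popL, ihcells, ihperm⟩ :=
        ih ((pvNbrs cx cy).foldl (pvG land n m) (V, rest)).1 (rest ++ N) (cells ++ [(cx, cy)])
          (L.erase (cx, cy)) hsh2 hq' hnd' (List.Nodup.erase _ hLnd) hL'
          (by rw [List.length_erase_of_mem hcL]; omega)
      rw [hstep, hq2]
      refine ⟨ihsh, ?_, (cx, cy) :: popL, ?_, ?_⟩
      · intro a b ha hb
        rw [ihvg a b ha hb, hvg2 a b ha hb]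
        by_cases hab : (a, b) = (cx, cy)
        · have ha2 : a = cx := congrArg Prod.fst hab
          have hb2 : b = cy := congrArg Prod.snd hab
          subst ha2; subst hb2
          simp [hcvis, hcL]
        · have hNL : (a, b) ∈ N → (a, b) ∈ L := fun h =>
            (hL _).2 (Or.inr ⟨((hNmem _).1 h).2,
              pvReach.step (pvReach.base hcmem) ((hNmem _).1 h).1 ((hNmem _).1 h).2⟩)
          rw [List.Nodup.mem_erase_iff hLnd]
          constructor
          · rintro ((h | h) | h)
            · exact Or.inl h
            · exact Or.inr (hNL h)
            · exact Or.inr h.2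
          · rintro (h | h)
            · exact Or.inl (Or.inl h)
            · exact Or.inr ⟨hab, h⟩
      · rw [ihcells, List.append_assoc]
        rfl
      · exact ((ihperm.cons (cx, cy)).trans (List.perm_cons_erase hcL).symm)

-- ---- the grid enumeration ----
def pvGrid (n m : Int) : List (Int × Int) :=
  (List.range n.toNat).flatMap (fun a : Nat => (List.range m.toNat).map (fun b : Nat => ((a : Int), (b : Int))))

theorem pvGrid_nodup (n m : Int) : (pvGrid n m).Nodup := by
  rw [pvGrid, List.nodup_flatMap]
  constructor
  · intro a _
    refine List.Nodup.map ?_ List.nodup_range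
    intro b1 b2 hb
    simpa using congrArg Prod.snd hb
  · refine List.Pairwise.imp ?_ (List.pairwise_lt_range (n := n.toNat))
    intro a b hab c hca hcb
    simp only [List.mem_map, List.mem_range] at hca hcb
    obtain ⟨b1, _, rfl⟩ := hca
    obtain ⟨b2, _, h⟩ := hcb
    have h1 := congrArg Prod.fst h
    simp only at h1
    have : b = a := by exact_mod_cast h1
    omega

theorem pvGrid_mem (n m : Int) (d : Int × Int) : d ∈ pvGrid n m ↔ pvInb n m d := by
  obtain ⟨x, y⟩ := d
  rw [pvGrid, pvInb]
  simp only [List.mem_flatMap, List.mem_map, List.mem_range]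
  show _ ↔ (0 ≤ x ∧ x < n ∧ 0 ≤ y ∧ y < m)
  constructor
  · rintro ⟨a, ha, b, hb, h⟩
    rw [Prod.mk.injEq] at h
    obtain ⟨h1, h2⟩ := h
    omega
  · rintro ⟨h1, h2, h3, h4⟩
    refine ⟨x.toNat, by omega, y.toNat, by omega, ?_⟩
    rw [Prod.mk.injEq]
    constructor <;> omega

theorem pvGrid_length (n m : Int) : (pvGrid n m).length = n.toNat * m.toNat := by
  rw [pvGrid, List.length_flatMap]
  simp [List.map_const', List.sum_replicate, smul_eq_mul]

-- ---- the per-column accumulation ----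
theorem pvAddRange (amt : Int) :
    ∀ (k : Nat) (a b : Int) (r : List Int), (b - a).toNat = k → 0 ≤ a →
      ((PySem.List.pyRange a b 1).foldl (fun r col => r.modify col.toNat (fun v => v + amt)) r).length = r.length ∧
      ∀ (j : Nat) (hj : j < r.length),
        ((PySem.List.pyRange a b 1).foldl (fun r col => r.modify col.toNat (fun v => v + amt)) r)[j]? =
          some (r[j] + if a ≤ (j : Int) ∧ (j : Int) < b then amt else 0) := by
  intro k
  induction k with
  | zero =>
    intro a b r hk ha
    have hba : b ≤ a := by omega
    rw [PySem.List.pyRange_one_eq_nil hba]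
    refine ⟨rfl, ?_⟩
    intro j hj
    rw [List.foldl_nil, if_neg (by omega), List.getElem?_eq_getElem hj]
    simp
  | succ k ihk =>
    intro a b r hk ha
    have hab : a < b := by omega
    rw [PySem.List.pyRange_one_cons hab, List.foldl_cons]
    obtain ⟨ihlen, ihget⟩ := ihk (a + 1) b (r.modify a.toNat (fun v => v + amt)) (by omega) (by omega)
    constructor
    · rw [ihlen, List.length_modify]
    · intro j hj
      have hj1 : j < (r.modify a.toNat (fun v => v + amt)).length := by
        rw [List.length_modify]; exact hj
      rw [ihget j hj1, List.getElem_modify]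
      congr 1
      split_ifs <;> omega

-- ---- relating the two per-component aggregates ----
theorem pvMin?_eq_foldl (ys : List Int) :
    PySem.List.min? ys (fun y => y) = ys.foldl pvOmin none := by
  cases ys with
  | nil => rfl
  | cons y t => rw [PySem.List.min?_id_cons, List.foldl_cons]; exact (pvOmin_foldl_some t y).symm

theorem pvMax?_eq_foldl (ys : List Int) :
    PySem.List.max? ys (fun y => y) = ys.foldl pvOmax none := by
  cases ys with
  | nil => rfl
  | cons y t => rw [PySem.List.max?_id_cons, List.foldl_cons]; exact (pvOmax_foldl_some t y).symm

theorem pvCellP_inb (_land : List (List Int)) (n m : Int) (V : List (List Bool))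
    (s d : Int × Int) (hs : pvInb n m s) (h : pvCellP (pvGood land n m V) [s] d) :
    pvInb n m d := by
  rcases h with h | ⟨⟨hi, _⟩, _⟩
  · rw [List.mem_singleton] at h; subst h; exact hs
  · exact hi

-- the invariant tying A's state to B's state between components
def pvRel (_land : List (List Int)) (n m : Int)
    (pA : List (List Bool) × List Int)
    (pB : List (List Bool) × List (List (Int × Int))) : Prop :=
  pA.1 = pB.1 ∧ pvShape pA.1 n m ∧
  pA.2 = (PySem.List.pyRange 0 m 1).map (fun c => pvColSum (pB.2.map pvSpanOf) c)

theorem pvCellStep (land : List (List Int)) (n m i j : Int)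
    (pA : List (List Bool) × List Int) (pB : List (List Bool) × List (List (Int × Int)))
    (hrel : pvRel land n m pA pB) (hi0 : 0 ≤ i) (hin : i < n) (hj0 : 0 ≤ j) (hjm : j < m) :
    pvRel land n m
      (if pvVget pA.1 i j = false ∧ pvLandAt land i j = 1
       then pvBfs land n m i j pA.1 pA.2 else pA)
      (if pvLandAt land i j = 1 ∧ pvVget pB.1 i j = false
       then ((pvDfsLoop land n m (n.toNat * m.toNat) (pvVset pB.1 i j) [(i, j)] []).1,
             pB.2 ++ [(pvDfsLoop land n m (n.toNat * m.toNat) (pvVset pB.1 i j) [(i, j)] []).2])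
       else pB) := by
  classical
  obtain ⟨hv, hsh, hres⟩ := hrel
  by_cases hcond : pvVget pA.1 i j = false ∧ pvLandAt land i j = 1
  · rw [if_pos hcond, if_pos (by rw [← hv]; exact ⟨hcond.2, hcond.1⟩), ← hv]
    have hsh1 : pvShape (pvVset pA.1 i j) n m := pvShape_pvVset _ _ _ _ _ hsh
    have hseed_in : pvInb n m (i, j) := ⟨hi0, hin, hj0, hjm⟩
    have hseedv : pvVget (pvVset pA.1 i j) i j = true := by
      rw [pvVget_pvVset pA.1 n m i j i j hsh hseed_in hi0 hj0, if_pos ⟨rfl, rfl⟩]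
    have hq : ∀ c ∈ [(i, j)], pvInb n m c ∧ pvVget (pvVset pA.1 i j) c.1 c.2 = true := by
      intro c hc
      rw [List.mem_singleton] at hc
      subst hc
      exact ⟨hseed_in, hseedv⟩
    set L := (pvGrid n m).filter
      (fun d => decide (pvCellP (pvGood land n m (pvVset pA.1 i j)) [(i, j)] d)) with hLdef
    have hLnd : L.Nodup := List.Nodup.filter _ (pvGrid_nodup n m)
    have hLmem : ∀ d, d ∈ L ↔ pvCellP (pvGood land n m (pvVset pA.1 i j)) [(i, j)] d := by
      intro d
      rw [hLdef, List.mem_filter]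
      constructor
      · rintro ⟨_, h⟩; exact of_decide_eq_true h
      · intro h
        exact ⟨(pvGrid_mem n m d).2 (pvCellP_inb land n m _ _ d hseed_in h), decide_eq_true h⟩
    have hlen : L.length ≤ n.toNat * m.toNat := by
      calc L.length ≤ (pvGrid n m).length := List.Sublist.length_le (List.filter_sublist ..)
        _ = n.toNat * m.toNat := pvGrid_length n m
    obtain ⟨bsh, bvg, bamt, bsy, bey⟩ :=
      pvBfs_closed land n m (n.toNat * m.toNat) (pvVset pA.1 i j) [(i, j)] 0 none none L hsh1 hq
        (List.nodup_singleton _) hLnd hLmem hlen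
    obtain ⟨dsh, dvg, popL, dcells, dperm⟩ :=
      pvDfs_closed land n m (n.toNat * m.toNat) (pvVset pA.1 i j) [(i, j)] [] L hsh1 hq
        (List.nodup_singleton _) hLnd hLmem hlen
    have hseedL : (i, j) ∈ L := (hLmem _).2 (Or.inl (List.mem_singleton.2 rfl))
    have hvis : (pvBfsLoop land n m (n.toNat * m.toNat) (pvVset pA.1 i j) [(i, j)] 0 none none).1
        = (pvDfsLoop land n m (n.toNat * m.toNat) (pvVset pA.1 i j) [(i, j)] []).1 := by
      refine pvGrid_ext _ _ n m bsh dsh ?_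
      intro a b
      rw [Bool.eq_iff_iff, bvg a b (Int.natCast_nonneg a) (Int.natCast_nonneg b),
        dvg a b (Int.natCast_nonneg a) (Int.natCast_nonneg b)]
    -- the component's column span
    cases hLs : L.map Prod.snd with
    | nil =>
      exact absurd (List.mem_map_of_mem hseedL) (by rw [hLs]; simp)
    | cons y0 ys =>
    have hsyv : (pvBfsLoop land n m (n.toNat * m.toNat) (pvVset pA.1 i j) [(i, j)] 0 none none).2.2.1
        = some (ys.foldl min y0) := by
      rw [bsy, ← List.foldl_map (f := Prod.snd) (g := pvOmin), hLs, List.foldl_cons]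
      exact pvOmin_foldl_some ys y0
    have heyv : (pvBfsLoop land n m (n.toNat * m.toNat) (pvVset pA.1 i j) [(i, j)] 0 none none).2.2.2
        = some (ys.foldl max y0) := by
      rw [bey, ← List.foldl_map (f := Prod.snd) (g := pvOmax), hLs, List.foldl_cons]
      exact pvOmax_foldl_some ys y0
    have hminL : PySem.List.min? (L.map Prod.snd) (fun y => y) = some (ys.foldl min y0) := by
      rw [hLs]; exact PySem.List.min?_id_cons y0 ys
    have hmaxL : PySem.List.max? (L.map Prod.snd) (fun y => y) = some (ys.foldl max y0) := by
      rw [hLs]; exact PySem.List.max?_id_cons y0 ys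
    have hlobound : 0 ≤ ys.foldl min y0 ∧ ys.foldl min y0 < m := by
      have hm := PySem.List.min?_mem hminL
      obtain ⟨c, hcL, hc2⟩ := List.mem_map.1 hm
      have := pvCellP_inb land n m _ _ c hseed_in ((hLmem c).1 hcL)
      rw [← hc2]
      exact ⟨this.2.2.1, this.2.2.2⟩
    have hhibound : 0 ≤ ys.foldl max y0 ∧ ys.foldl max y0 < m := by
      have hm := PySem.List.max?_mem hmaxL
      obtain ⟨c, hcL, hc2⟩ := List.mem_map.1 hm
      have := pvCellP_inb land n m _ _ c hseed_in ((hLmem c).1 hcL)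
      rw [← hc2]
      exact ⟨this.2.2.1, this.2.2.2⟩
    have hlohi : ys.foldl min y0 ≤ ys.foldl max y0 :=
      PySem.List.min?_isMin hminL _ (PySem.List.max?_mem hmaxL)
    -- B's span of the popped component equals A's
    have hpermsnd : (popL.map Prod.snd).Perm (L.map Prod.snd) := dperm.map _
    have hfoldmin : (popL.map Prod.snd).foldl pvOmin none = some (ys.foldl min y0) := by
      letI : RightCommutative pvOmin := ⟨pvOmin_rc⟩
      rw [hpermsnd.foldl_eq none, hLs, List.foldl_cons]
      exact pvOmin_foldl_some ys y0
    have hfoldmax : (popL.map Prod.snd).foldl pvOmax none = some (ys.foldl max y0) := by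
      letI : RightCommutative pvOmax := ⟨pvOmax_rc⟩
      rw [hpermsnd.foldl_eq none, hLs, List.foldl_cons]
      exact pvOmax_foldl_some ys y0
    have hspan : pvSpanOf popL = (ys.foldl min y0, ys.foldl max y0, (L.length : Int)) := by
      rw [pvSpanOf, pvMin?_eq_foldl, pvMax?_eq_foldl, hfoldmin, hfoldmax, dperm.length_eq]
      rfl
    refine ⟨?_, ?_, ?_⟩
    · simpa [pvBfs] using hvis
    · simpa [pvBfs] using bsh
    · -- the result array
      show (PySem.List.pyRange
            ((pvBfsLoop land n m (n.toNat * m.toNat) (pvVset pA.1 i j) [(i, j)] 0 none none).2.2.1.getD 0)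
            ((pvBfsLoop land n m (n.toNat * m.toNat) (pvVset pA.1 i j) [(i, j)] 0 none none).2.2.2.getD 0 + 1) 1).foldl
          (fun r col => r.modify col.toNat (fun v => v +
            (pvBfsLoop land n m (n.toNat * m.toNat) (pvVset pA.1 i j) [(i, j)] 0 none none).2.1)) pA.2
        = (PySem.List.pyRange 0 m 1).map (fun c => pvColSum
            ((pB.2 ++ [(pvDfsLoop land n m (n.toNat * m.toNat) (pvVset pA.1 i j) [(i, j)] []).2]).map pvSpanOf) c)
      rw [hsyv, heyv, dcells, List.nil_append, Option.getD_some, Option.getD_some]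
      obtain ⟨halen, haget⟩ := pvAddRange
        ((pvBfsLoop land n m (n.toNat * m.toNat) (pvVset pA.1 i j) [(i, j)] 0 none none).2.1)
        ((ys.foldl max y0 + 1 - ys.foldl min y0).toNat) (ys.foldl min y0) (ys.foldl max y0 + 1)
        pA.2 rfl hlobound.1
      have hreslen : pA.2.length = m.toNat := by
        rw [hres, List.length_map, PySem.List.length_pyRange_one]
        omega
      apply List.ext_getElem?
      intro k
      by_cases hk : k < m.toNat
      · rw [haget k (by omega)]
        have hk2 : k < ((PySem.List.pyRange 0 m 1).map (fun c => pvColSum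
            ((pB.2 ++ [popL]).map pvSpanOf) c)).length := by
          rw [List.length_map, PySem.List.length_pyRange_one]; omega
        rw [List.getElem?_eq_getElem hk2, List.getElem_map, PySem.List.getElem_pyRange_one]
        have hk3 : k < ((PySem.List.pyRange 0 m 1).map (fun c => pvColSum (pB.2.map pvSpanOf) c)).length := by
          rw [List.length_map, PySem.List.length_pyRange_one]; omega
        have hpa : pA.2[k]'(by omega) = pvColSum (pB.2.map pvSpanOf) (0 + (k : Int)) := by
          have h1 : pA.2[k]? = some (pvColSum (pB.2.map pvSpanOf) (0 + (k : Int))) := by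
            rw [hres, List.getElem?_eq_getElem hk3, List.getElem_map, PySem.List.getElem_pyRange_one]
          rw [List.getElem?_eq_getElem (by omega)] at h1
          exact Option.some.inj h1
        rw [hpa]
        have hcol : pvColSum ((pB.2 ++ [popL]).map pvSpanOf) (0 + (k : Int))
            = (if ys.foldl min y0 ≤ 0 + (k : Int) ∧ 0 + (k : Int) ≤ ys.foldl max y0
               then pvColSum (pB.2.map pvSpanOf) (0 + (k : Int)) + (L.length : Int)
               else pvColSum (pB.2.map pvSpanOf) (0 + (k : Int))) := by
          rw [List.map_append, pvColSum, List.foldl_append]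
          simp only [List.map_cons, List.map_nil, List.foldl_cons, List.foldl_nil, hspan]
          rw [pvColSum]
        rw [hcol, bamt]
        congr 1
        split_ifs <;> omega
      · rw [List.getElem?_eq_none (by rw [halen]; omega),
          List.getElem?_eq_none (by rw [List.length_map, PySem.List.length_pyRange_one]; omega)]
  · rw [if_neg hcond, if_neg (by rw [← hv]; tauto)]
    exact ⟨hv, hsh, hres⟩

theorem pvRows (land : List (List Int)) (n m i : Int) (hi0 : 0 ≤ i) (hin : i < n) :
    ∀ (js : List Int), (∀ j ∈ js, 0 ≤ j ∧ j < m) →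
    ∀ pA pB, pvRel land n m pA pB →
    pvRel land n m
      (js.foldl (fun (st : List (List Bool) × List Int) j =>
        if pvVget st.1 i j = false ∧ pvLandAt land i j = 1
        then pvBfs land n m i j st.1 st.2 else st) pA)
      (js.foldl (fun (st : List (List Bool) × List (List (Int × Int))) j =>
        if pvLandAt land i j = 1 ∧ pvVget st.1 i j = false
        then ((pvDfsLoop land n m (n.toNat * m.toNat) (pvVset st.1 i j) [(i, j)] []).1,
              st.2 ++ [(pvDfsLoop land n m (n.toNat * m.toNat) (pvVset st.1 i j) [(i, j)] []).2])
        else st) pB) := by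
  intro js
  induction js with
  | nil => intro _ pA pB h; exact h
  | cons j js ih =>
    intro hb pA pB h
    rw [List.foldl_cons, List.foldl_cons]
    exact ih (fun x hx => hb x (List.mem_cons_of_mem _ hx)) _ _
      (pvCellStep land n m i j pA pB h hi0 hin (hb j List.mem_cons_self).1 (hb j List.mem_cons_self).2)

theorem pvCols (land : List (List Int)) (n m : Int) :
    ∀ (is : List Int), (∀ i ∈ is, 0 ≤ i ∧ i < n) →
    ∀ pA pB, pvRel land n m pA pB →
    pvRel land n m
      (is.foldl (fun st i =>
        (PySem.List.pyRange 0 m 1).foldl (fun (st : List (List Bool) × List Int) j =>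
          if pvVget st.1 i j = false ∧ pvLandAt land i j = 1
          then pvBfs land n m i j st.1 st.2 else st) st) pA)
      (is.foldl (fun st i =>
        (PySem.List.pyRange 0 m 1).foldl (fun (st : List (List Bool) × List (List (Int × Int))) j =>
          if pvLandAt land i j = 1 ∧ pvVget st.1 i j = false
          then ((pvDfsLoop land n m (n.toNat * m.toNat) (pvVset st.1 i j) [(i, j)] []).1,
                st.2 ++ [(pvDfsLoop land n m (n.toNat * m.toNat) (pvVset st.1 i j) [(i, j)] []).2])
          else st) st) pB) := by
  intro is
  induction is with
  | nil => intro _ pA pB h; exact h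
  | cons i is ih =>
    intro hb pA pB h
    rw [List.foldl_cons, List.foldl_cons]
    refine ih (fun x hx => hb x (List.mem_cons_of_mem _ hx)) _ _ ?_
    refine pvRows land n m i (hb i List.mem_cons_self).1 (hb i List.mem_cons_self).2
      (PySem.List.pyRange 0 m 1) ?_ pA pB h
    intro j hj
    exact PySem.List.mem_pyRange_one.1 hj

-- ---- top level ----
theorem pv_main (land : List (List Int)) : solution land = solution_alt land := by
  simp only [solution, solution_alt]
  have hvinit : ((PySem.List.pyRange 0 (land.length : Int) 1).map
        (fun _ => (PySem.List.pyRange 0 ((((PySem.List.pyGet? land 0).getD []) : List Int).length : Int) 1).map (fun _ => false)))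
      = List.replicate (land.length : Int).toNat
          (List.replicate ((((PySem.List.pyGet? land 0).getD []) : List Int).length : Int).toNat false) := by
    simp [List.map_const', PySem.List.length_pyRange_one]
  have hshinit : pvShape ((PySem.List.pyRange 0 (land.length : Int) 1).map
        (fun _ => (PySem.List.pyRange 0 ((((PySem.List.pyGet? land 0).getD []) : List Int).length : Int) 1).map (fun _ => false)))
      (land.length : Int) ((((PySem.List.pyGet? land 0).getD []) : List Int).length : Int) := by
    constructor
    · rw [List.length_map, PySem.List.length_pyRange_one]
      omega
    · intro row hrow
      rw [List.mem_map] at hrow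
      obtain ⟨_, _, rfl⟩ := hrow
      rw [List.length_map, PySem.List.length_pyRange_one]
      omega
  have hrinit : ((PySem.List.pyRange 0 ((((PySem.List.pyGet? land 0).getD []) : List Int).length : Int) 1).map (fun _ => (0 : Int)))
      = (PySem.List.pyRange 0 ((((PySem.List.pyGet? land 0).getD []) : List Int).length : Int) 1).map
          (fun c => pvColSum (([] : List (List (Int × Int))).map pvSpanOf) c) :=
    List.map_congr_left (fun a _ => rfl)
  have hrel := pvCols land (land.length : Int) ((((PySem.List.pyGet? land 0).getD []) : List Int).length : Int)
    (PySem.List.pyRange 0 (land.length : Int) 1)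
    (fun x hx => PySem.List.mem_pyRange_one.1 hx)
    (((PySem.List.pyRange 0 (land.length : Int) 1).map
        (fun _ => (PySem.List.pyRange 0 ((((PySem.List.pyGet? land 0).getD []) : List Int).length : Int) 1).map (fun _ => false))),
      ((PySem.List.pyRange 0 ((((PySem.List.pyGet? land 0).getD []) : List Int).length : Int) 1).map (fun _ => (0 : Int))))
    ((List.replicate (land.length : Int).toNat
        (List.replicate ((((PySem.List.pyGet? land 0).getD []) : List Int).length : Int).toNat false)), [])
    ⟨hvinit, hshinit, hrinit⟩
  obtain ⟨_, _, hres⟩ := hrel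
  rw [hres]


-- ===== VERDICT (by name: the statement is the Claim_ definition above) =====
theorem solution_spec : Claim_equal_solution := by
  unfold Claim_equal_solution Spec_solution
  intro land _ _
  exact pv_main land
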